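-- pv_equiv track=rewrite | github.com/Leapense/problems | 15475번： 双六 (Sugoroku)/双六 (Sugoroku).py | find_min_dice
-- ===== SOURCE A (Python) =====
-- from collections import deque
--
-- def find_min_dice(N, A):
--     goal = N + 1  # Goal is at index N+1 (0-indexed would be N+1)
--
--     for dice_faces in range(1, N + 2):  # Check dice from 1 face up to N+1 faces
--         reachable = [False] * (N + 2)  # Track which squares are reachable
--         queue = deque([0])  # Start BFS from the start square, index 0
--         reachable[0] = True
--
--         while queue:
--             current = queue.popleft()
--
--             # Try every roll from 1 to dice_faces
--             for roll in range(1, dice_faces + 1):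
--                 next_position = current + roll
--                 if next_position > goal:  # If we surpass the goal, this dice is valid
--                     return dice_faces
--                 if next_position <= N and A[next_position - 1] == 1:
--                     continue  # If the next position is dangerous, skip it
--                 if next_position <= goal and not reachable[next_position]:
--                     reachable[next_position] = True
--                     queue.append(next_position)
--
--     # Fallback, though we should have returned from within the loop
--     return N + 1
-- ===== SOURCE B (Python) =====
-- def find_min_dice(N, A):
--     # standable squares: start 0, every safe cell, and the goal N+1
--     squares = [0] + [p for p in range(1, N + 1) if A[p - 1] != 1] + [N + 1]
--     # the minimal dice is the largest jump we are ever forced to make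
--     return max(b - a for a, b in zip(squares, squares[1:]))
-- ===== Notes on version B (the rewrite author's own statement) =====
-- stated objective: faster
-- what changed: Replaces the try-every-dice BFS (rebuilt for each candidate dice size) by a single linear scan that returns the maximum gap between consecutive standable squares (start 0, safe cells, goal N+1).
import Mathlib
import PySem

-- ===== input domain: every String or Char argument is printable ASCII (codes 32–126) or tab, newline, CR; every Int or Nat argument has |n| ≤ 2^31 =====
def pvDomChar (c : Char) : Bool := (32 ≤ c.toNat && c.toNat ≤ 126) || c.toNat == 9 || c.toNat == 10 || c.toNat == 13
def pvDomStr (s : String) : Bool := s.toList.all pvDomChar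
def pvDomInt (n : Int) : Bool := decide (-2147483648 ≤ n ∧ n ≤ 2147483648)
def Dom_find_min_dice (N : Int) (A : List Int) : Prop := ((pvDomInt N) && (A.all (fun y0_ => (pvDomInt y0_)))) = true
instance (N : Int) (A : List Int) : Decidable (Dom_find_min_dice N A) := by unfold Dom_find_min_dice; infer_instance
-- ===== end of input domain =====

-- B replaces A's try-every-dice BFS by one linear max-gap scan over the standable squares (objective: faster).

-- ===== PORT A =====
-- inner 'for roll in range(1, dice_faces+1)' loop; 'none' = the early 'return dice_faces'
def pvRollsA (N : Int) (A : List Int) (goal current : Int) :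
    List Int → List Bool → List Int → Option (List Bool × List Int)
  | [], reachable, queue => some (reachable, queue)
  | roll :: rs, reachable, queue =>
    let next := current + roll
    if next > goal then none
    else if next ≤ N ∧ PySem.List.pyGetD A (next - 1) 0 = 1 then
      pvRollsA N A goal current rs reachable queue
    else if next ≤ goal ∧ ¬ (PySem.List.pyGetD reachable next false = true) then
      pvRollsA N A goal current rs (PySem.List.pySetD reachable next true) (queue ++ [next])
    else
      pvRollsA N A goal current rs reachable queue

-- 'while queue:' BFS loop; fuel bounds the number of pops (each popped square was marked
-- reachable exactly once, so at most N+2 pops happen; fuel (N+2).toNat+1 is never exhausted)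
def pvWhileA (N : Int) (A : List Int) (goal d : Int) :
    Nat → List Bool → List Int → Bool
  | 0, _, _ => false
  | fuel + 1, reachable, queue =>
    match queue with
    | [] => false
    | current :: rest =>
      match pvRollsA N A goal current (PySem.List.pyRange 1 (d + 1) 1) reachable rest with
      | none => true
      | some (r', q') => pvWhileA N A goal d fuel r' q'

-- 'for dice_faces in range(1, N+2)' with the fallback 'return N + 1'
def pvDiceA (N : Int) (A : List Int) (goal : Int) : List Int → Int
  | [] => N + 1
  | d :: ds =>
    let reachable := PySem.List.pySetD (List.replicate (N + 2).toNat false) 0 true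
    if pvWhileA N A goal d ((N + 2).toNat + 1) reachable [0] then d
    else pvDiceA N A goal ds

def find_min_dice (N : Int) (A : List Int) : Int :=
  let goal := N + 1
  pvDiceA N A goal (PySem.List.pyRange 1 (N + 2) 1)

-- ===== PORT B =====
def find_min_dice_alt (N : Int) (A : List Int) : Int :=
  let squares : List Int :=
    0 :: ((PySem.List.pyRange 1 (N + 1) 1).filter
            (fun p => decide (¬ PySem.List.pyGetD A (p - 1) 0 = 1)) ++ [N + 1])
  let gaps := List.zipWith (fun a b => b - a) squares (squares.drop 1)
  match gaps with
  | [] => 0            -- unreachable: squares always has ≥ 2 elements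
  | g :: gs => gs.foldl max g

-- ===== PRECONDITION & SPEC =====
-- Pre_ excludes exactly the inputs with N > len(A), on which the Python A raises IndexError
-- while scanning the squares (the Python B raises IndexError there as well).
def Pre_find_min_dice (N : Int) (A : List Int) : Prop := N ≤ (A.length : Int)
instance (N : Int) (A : List Int) : Decidable (Pre_find_min_dice N A) := by
  unfold Pre_find_min_dice; infer_instance

def pvWitness_find_min_dice : Int × List Int := (2, [0, 1])

def Spec_find_min_dice (N : Int) (A : List Int) (out : Int) : Prop := out = find_min_dice_alt N A
instance (N : Int) (A : List Int) (out : Int) : Decidable (Spec_find_min_dice N A out) := by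
  unfold Spec_find_min_dice; infer_instance

-- ===== CLAIM (what is proved, stated in full; the proofs are below) =====
def Claim_equal_find_min_dice : Prop := ∀ (N : Int) (A : List Int), Dom_find_min_dice N A → Pre_find_min_dice N A → Spec_find_min_dice N A (find_min_dice N A)

-- ===== LEMMAS AND PROOFS =====

-- the standable squares, exactly as B builds them
def sqOf (N : Int) (A : List Int) : List Int :=
  0 :: ((PySem.List.pyRange 1 (N + 1) 1).filter
          (fun p => decide (¬ PySem.List.pyGetD A (p - 1) 0 = 1)) ++ [N + 1])

def gapsOf (xs : List Int) : List Int := List.zipWith (fun a b => b - a) xs (xs.drop 1)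

theorem alt_eq (N : Int) (A : List Int) :
    find_min_dice_alt N A =
      match gapsOf (sqOf N A) with
      | [] => 0
      | g :: gs => gs.foldl max g := rfl

-- interval membership test used to describe A's queue
def inIv (a b t : Int) : Bool := decide (a < t) && decide (t ≤ b)

theorem inIv_true_iff (a b t : Int) : inIv a b t = true ↔ a < t ∧ t ≤ b := by
  simp [inIv]

-- BFS state invariant: reachable marks exactly the standable squares ≤ b
def MarkedInv (N : Int) (A : List Int) (reachable : List Bool) (b : Int) : Prop :=
  reachable.length = (N + 2).toNat ∧
  ∀ p : Int, 0 ≤ p → p ≤ N + 1 →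
    (PySem.List.pyGetD reachable p false = true ↔ (p ∈ sqOf N A ∧ p ≤ b))

-- membership in the squares list
theorem mem_sqOf (N : Int) (A : List Int) (t : Int) :
    t ∈ sqOf N A ↔ t = 0 ∨ (1 ≤ t ∧ t ≤ N ∧ ¬ PySem.List.pyGetD A (t - 1) 0 = 1) ∨ t = N + 1 := by
  simp only [sqOf, List.mem_cons, List.mem_append, List.mem_filter,
    PySem.List.mem_pyRange_one, decide_eq_true_eq,
    List.not_mem_nil, or_false]
  constructor
  · rintro (h | ⟨⟨h1, h2⟩, h3⟩ | h)
    · exact Or.inl h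
    · exact Or.inr (Or.inl ⟨h1, by omega, h3⟩)
    · exact Or.inr (Or.inr h)
  · rintro (h | ⟨h1, h2, h3⟩ | h)
    · exact Or.inl h
    · exact Or.inr (Or.inl ⟨⟨h1, by omega⟩, h3⟩)
    · exact Or.inr (Or.inr h)

theorem inIv_false_iff (a b t : Int) : inIv a b t = false ↔ ¬ (a < t ∧ t ≤ b) := by
  rw [← inIv_true_iff, Bool.eq_false_iff]

theorem sqOf_sorted (N : Int) (A : List Int) (hN : 0 ≤ N) :
    (sqOf N A).Pairwise (· < ·) := by
  have hf : ((PySem.List.pyRange 1 (N + 1) 1).filter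
      (fun p => decide (¬ PySem.List.pyGetD A (p - 1) 0 = 1))).Pairwise (· < ·) :=
    List.Pairwise.filter _ (PySem.List.pairwise_lt_pyRange_one 1 (N + 1))
  have hmem : ∀ y ∈ (PySem.List.pyRange 1 (N + 1) 1).filter
      (fun p => decide (¬ PySem.List.pyGetD A (p - 1) 0 = 1)), 1 ≤ y ∧ y < N + 1 := by
    intro y hy
    exact PySem.List.mem_pyRange_one.1 (List.mem_filter.1 hy).1
  rw [sqOf]
  refine List.pairwise_cons.2 ⟨?_, ?_⟩
  · intro y hy
    rcases List.mem_append.1 hy with h | h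
    · have := hmem y h; omega
    · simp only [List.mem_singleton] at h; omega
  · refine List.pairwise_append.2 ⟨hf, by simp, ?_⟩
    intro x hx y hy
    have := hmem x hx
    simp only [List.mem_singleton] at hy
    omega

theorem sqOf_bounds (N : Int) (A : List Int) (hN : 0 ≤ N) :
    ∀ t ∈ sqOf N A, 0 ≤ t ∧ t ≤ N + 1 := by
  intro t ht
  rcases (mem_sqOf N A t).1 ht with h | ⟨h1, h2, _⟩ | h <;> omega

theorem zero_mem_sqOf (N : Int) (A : List Int) : 0 ∈ sqOf N A := by simp [sqOf]

theorem goal_mem_sqOf (N : Int) (A : List Int) : N + 1 ∈ sqOf N A := by simp [sqOf]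

-- ---- filter lemmas on strictly sorted lists ----
theorem filter_btw_merge (xs : List Int) (hs : xs.Pairwise (· < ·)) (a b c : Int)
    (hab : a ≤ b) (hbc : b ≤ c) :
    xs.filter (inIv a b) ++ xs.filter (inIv b c) = xs.filter (inIv a c) := by
  induction xs with
  | nil => simp
  | cons x t ih =>
    rcases List.pairwise_cons.1 hs with ⟨hx, ht⟩
    by_cases hxb : x ≤ b
    · have h1 : inIv b c x = false := by rw [inIv_false_iff]; omega
      have h2 : inIv a c x = inIv a b x := by
        rw [Bool.eq_iff_iff, inIv_true_iff, inIv_true_iff]; omega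
      cases hax : inIv a b x with
      | true =>
        rw [List.filter_cons_of_pos (by exact hax), List.filter_cons_of_neg (by rw [h1]; simp),
          List.filter_cons_of_pos (by rw [h2, hax]), List.cons_append, ih ht]
      | false =>
        rw [List.filter_cons_of_neg (by rw [hax]; simp),
          List.filter_cons_of_neg (by rw [h1]; simp),
          List.filter_cons_of_neg (by rw [h2, hax]; simp), ih ht]
    · push_neg at hxb
      have h1 : inIv a b x = false := by rw [inIv_false_iff]; omega
      have hnil : t.filter (inIv a b) = [] := List.filter_eq_nil_iff.2 (fun y hy => by
        have := hx y hy; rw [inIv_true_iff]; omega)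
      have hcong : List.filter (inIv b c) (x :: t) = List.filter (inIv a c) (x :: t) := by
        apply List.filter_congr
        intro y hy
        have hby : b < y := by
          rcases List.mem_cons.1 hy with rfl | h
          · exact hxb
          · exact lt_trans hxb (hx y h)
        rw [Bool.eq_iff_iff, inIv_true_iff, inIv_true_iff]; omega
      rw [List.filter_cons_of_neg (by rw [h1]; simp), hnil, List.nil_append, hcong]

theorem filter_gt_split (xs : List Int) (hs : xs.Pairwise (· < ·)) (a c : Int) (hac : a ≤ c) :
    xs.filter (fun t => decide (a < t)) =
      xs.filter (inIv a c) ++ xs.filter (fun t => decide (c < t)) := by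
  induction xs with
  | nil => simp
  | cons x t ih =>
    rcases List.pairwise_cons.1 hs with ⟨hx, ht⟩
    by_cases hxc : x ≤ c
    · have h1 : (decide (c < x) : Bool) = false := by simp; omega
      have h2 : inIv a c x = decide (a < x) := by
        rw [Bool.eq_iff_iff, inIv_true_iff]; simp; omega
      have e3 : (x :: t).filter (fun s => decide (c < s)) = t.filter (fun s => decide (c < s)) :=
        List.filter_cons_of_neg (by rw [h1]; simp)
      cases hax : (decide (a < x) : Bool) with
      | true =>
        have e1 : (x :: t).filter (fun s => decide (a < s)) = x :: t.filter (fun s => decide (a < s)) :=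
          List.filter_cons_of_pos (by exact hax)
        have e2 : (x :: t).filter (inIv a c) = x :: t.filter (inIv a c) :=
          List.filter_cons_of_pos (by rw [h2, hax])
        rw [e1, e2, e3, List.cons_append, ih ht]
      | false =>
        have e1 : (x :: t).filter (fun s => decide (a < s)) = t.filter (fun s => decide (a < s)) :=
          List.filter_cons_of_neg (by rw [hax]; simp)
        have e2 : (x :: t).filter (inIv a c) = t.filter (inIv a c) :=
          List.filter_cons_of_neg (by rw [h2, hax]; simp)
        rw [e1, e2, e3, ih ht]
    · push_neg at hxc
      have h1 : inIv a c x = false := by rw [inIv_false_iff]; omega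
      have hnil : t.filter (inIv a c) = [] := List.filter_eq_nil_iff.2 (fun y hy => by
        have := hx y hy; rw [inIv_true_iff]; omega)
      have hcong : List.filter (fun t => decide (a < t)) (x :: t) =
          List.filter (fun t => decide (c < t)) (x :: t) := by
        apply List.filter_congr
        intro y hy
        have hcy : c < y := by
          rcases List.mem_cons.1 hy with rfl | h
          · exact hxc
          · exact lt_trans hxc (hx y h)
        simp only [decide_eq_decide]; omega
      have e2 : (x :: t).filter (inIv a c) = t.filter (inIv a c) :=
        List.filter_cons_of_neg (by rw [h1]; simp)
      rw [hcong, e2, hnil, List.nil_append]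

theorem filter_sorted_cons (xs : List Int) (hs : xs.Pairwise (· < ·)) (p : Int → Bool)
    (c : Int) (rest : List Int) (h : xs.filter p = c :: rest) :
    rest = xs.filter (fun t => p t && decide (c < t)) := by
  induction xs generalizing c rest with
  | nil => simp at h
  | cons x t ih =>
    rcases List.pairwise_cons.1 hs with ⟨hx, ht⟩
    cases hpx : p x with
    | true =>
      rw [List.filter_cons_of_pos hpx, List.cons.injEq] at h
      obtain ⟨rfl, rfl⟩ := h
      have e : (x :: t).filter (fun s => p s && decide (x < s)) =
          t.filter (fun s => p s && decide (x < s)) :=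
        List.filter_cons_of_neg (by simp)
      rw [e]
      symm
      apply List.filter_congr
      intro y hy
      have hcy : x < y := hx y hy
      simp [hcy]
    | false =>
      rw [List.filter_cons_of_neg (by rw [hpx]; simp)] at h
      have e : (x :: t).filter (fun s => p s && decide (c < s)) =
          t.filter (fun s => p s && decide (c < s)) :=
        List.filter_cons_of_neg (by rw [hpx]; simp)
      rw [e]
      exact ih ht _ _ h

theorem filter_btw_snoc (xs : List Int) (hs : xs.Pairwise (· < ·)) (lo v : Int)
    (hv : v ∈ xs) (hlv : lo < v) :
    xs.filter (inIv lo v) = xs.filter (inIv lo (v - 1)) ++ [v] := by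
  induction xs with
  | nil => simp at hv
  | cons x t ih =>
    rcases List.pairwise_cons.1 hs with ⟨hx, ht⟩
    by_cases hxv : x = v
    · subst hxv
      have hnil1 : t.filter (inIv lo x) = [] := List.filter_eq_nil_iff.2 (fun y hy => by
        have := hx y hy; rw [inIv_true_iff]; omega)
      have hnil2 : t.filter (inIv lo (x - 1)) = [] := List.filter_eq_nil_iff.2 (fun y hy => by
        have := hx y hy; rw [inIv_true_iff]; omega)
      rw [List.filter_cons_of_pos (by rw [inIv_true_iff]; omega),
        List.filter_cons_of_neg (by rw [inIv_true_iff]; omega), hnil1, hnil2]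
      simp
    · have hvt : v ∈ t := by
        rcases List.mem_cons.1 hv with h | h
        · exact absurd h.symm hxv
        · exact h
      have hxv' : x < v := hx v hvt
      have h2 : inIv lo (v - 1) x = inIv lo v x := by
        rw [Bool.eq_iff_iff, inIv_true_iff, inIv_true_iff]; omega
      cases hax : inIv lo v x with
      | true =>
        rw [List.filter_cons_of_pos hax, List.filter_cons_of_pos (by rw [h2, hax]),
          ih ht hvt, List.cons_append]
      | false =>
        rw [List.filter_cons_of_neg (by rw [hax]; simp),
          List.filter_cons_of_neg (by rw [h2, hax]; simp), ih ht hvt]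

-- ---- gap list lemmas ----
theorem gapsOf_cons₂ (x y : Int) (t : List Int) :
    gapsOf (x :: y :: t) = (y - x) :: gapsOf (y :: t) := rfl

theorem sub_mem_gapsOf (l1 : List Int) (u v : Int) (l2 : List Int) :
    (v - u) ∈ gapsOf (l1 ++ u :: v :: l2) := by
  induction l1 with
  | nil => rw [List.nil_append, gapsOf_cons₂]; exact List.mem_cons_self ..
  | cons x t ih =>
    rcases hrep : t ++ u :: v :: l2 with _ | ⟨w, ws⟩
    · exact absurd hrep (by simp)
    · rw [List.cons_append, hrep, gapsOf_cons₂]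
      rw [hrep] at ih
      exact List.mem_cons_of_mem _ ih

theorem gapsOf_mem_split (xs : List Int) (g : Int) (h : g ∈ gapsOf xs) :
    ∃ l1 u v l2, xs = l1 ++ u :: v :: l2 ∧ g = v - u := by
  induction xs generalizing g with
  | nil => simp [gapsOf] at h
  | cons x t ih =>
    cases t with
    | nil => simp [gapsOf] at h
    | cons y s =>
      rw [gapsOf_cons₂] at h
      rcases List.mem_cons.1 h with rfl | h
      · exact ⟨[], x, y, s, rfl, rfl⟩
      · obtain ⟨l1, u, v, l2, heq, hg⟩ := ih _ h
        exact ⟨x :: l1, u, v, l2, by rw [List.cons_append, ← heq], hg⟩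

-- ---- invariant transport ----
theorem MarkedInv_mono (N : Int) (A : List Int) (reachable : List Bool) (B B' : Int)
    (hM : MarkedInv N A reachable B) (h : ∀ p ∈ sqOf N A, (p ≤ B ↔ p ≤ B')) :
    MarkedInv N A reachable B' := by
  refine ⟨hM.1, fun p hp0 hpN => ?_⟩
  rw [hM.2 p hp0 hpN]
  constructor
  · rintro ⟨hm, hb⟩; exact ⟨hm, (h p hm).1 hb⟩
  · rintro ⟨hm, hb⟩; exact ⟨hm, (h p hm).2 hb⟩

theorem MarkedInv_set (N : Int) (A : List Int) (reachable : List Bool) (B : Int)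
    (hM : MarkedInv N A reachable B) (x : Int) (h1 : 1 ≤ x) (h2 : x ≤ N + 1)
    (hxs : x ∈ sqOf N A) (B' : Int) (hxB : x ≤ B')
    (hmono : ∀ p ∈ sqOf N A, p ≠ x → (p ≤ B ↔ p ≤ B')) :
    MarkedInv N A (PySem.List.pySetD reachable x true) B' := by
  obtain ⟨hlen, hget⟩ := hM
  constructor
  · rw [PySem.List.length_pySetD, hlen]
  · intro p hp0 hpN
    have e : PySem.List.pySetD reachable x true = reachable.set x.toNat true :=
      PySem.List.pySetD_of_nonneg _ true (by omega)
    rw [e, PySem.List.pyGetD_eq_getElem _ false hp0 (by simp [hlen]; omega),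
      List.getElem_set (by simp [hlen]; omega)]
    by_cases hpx : p = x
    · subst hpx
      rw [if_pos rfl]
      simp [hxs, hxB]
    · rw [if_neg (by omega)]
      have := hget p hp0 hpN
      rw [← PySem.List.pyGetD_eq_getElem _ false hp0 (by simp [hlen]; omega), this]
      constructor
      · rintro ⟨hm, hb⟩; exact ⟨hm, (hmono p hm hpx).1 hb⟩
      · rintro ⟨hm, hb⟩; exact ⟨hm, (hmono p hm hpx).2 hb⟩

-- ---- the rolls loop ----
theorem pvRollsA_spec (N : Int) (A : List Int) (hN : 0 ≤ N)
    (d c b : Int) (hd : 1 ≤ d) (hc : c ∈ sqOf N A) (hc0 : 0 ≤ c) (q0 : List Int) :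
    ∀ k : Nat, ∀ r : Int, r + k = d + 1 → 1 ≤ r →
    ∀ reachable queue,
      MarkedInv N A reachable (max b (c + r - 1)) →
      queue = q0 ++ (sqOf N A).filter (inIv b (c + r - 1)) →
      (if r ≤ d ∧ N + 1 < c + d then
         pvRollsA N A (N + 1) c (PySem.List.pyRange r (d + 1) 1) reachable queue = none
       else ∃ R Q,
         pvRollsA N A (N + 1) c (PySem.List.pyRange r (d + 1) 1) reachable queue = some (R, Q) ∧
         MarkedInv N A R (max b (c + d)) ∧
         Q = q0 ++ (sqOf N A).filter (inIv b (c + d))) := by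
  intro k
  induction k with
  | zero =>
    intro r hr h1r reachable queue hM hQ
    have hrd : c + r - 1 = c + d := by omega
    rw [hrd] at hM hQ
    rw [PySem.List.pyRange_one_eq_nil (by omega), if_neg (by omega)]
    exact ⟨reachable, queue, rfl, hM, hQ⟩
  | succ k ihk =>
    intro r hr h1r reachable queue hM hQ
    have hrd : r ≤ d := by omega
    rw [PySem.List.pyRange_one_cons (by omega : r < d + 1)]
    by_cases hbig : c + r > N + 1
    · rw [if_pos ⟨hrd, by omega⟩]
      simp only [pvRollsA]
      rw [if_pos hbig]
    · -- next = c + r stays on the board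
      have hg : (r ≤ d ∧ N + 1 < c + d) ↔ (r + 1 ≤ d ∧ N + 1 < c + d) := by omega
      have harith : c + (r + 1) - 1 = c + r := by ring
      by_cases hdang : c + r ≤ N ∧ PySem.List.pyGetD A (c + r - 1) 0 = 1
      · -- dangerous square: not standable, state unchanged
        have hns : c + r ∉ sqOf N A := by
          rw [mem_sqOf]
          rintro (h | ⟨-, -, h3⟩ | h)
          · omega
          · exact h3 hdang.2
          · omega
        have hstep : pvRollsA N A (N + 1) c (r :: PySem.List.pyRange (r + 1) (d + 1) 1) reachable queue
            = pvRollsA N A (N + 1) c (PySem.List.pyRange (r + 1) (d + 1) 1) reachable queue := by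
          simp only [pvRollsA]
          rw [if_neg hbig, if_pos hdang]
        have hM' : MarkedInv N A reachable (max b (c + (r + 1) - 1)) := by
          refine MarkedInv_mono N A reachable _ _ hM (fun p hp => ?_)
          have : p ≠ c + r := fun he => hns (he ▸ hp)
          rw [harith]; omega
        have hQ' : queue = q0 ++ (sqOf N A).filter (inIv b (c + (r + 1) - 1)) := by
          rw [hQ, harith]
          congr 1
          apply List.filter_congr
          intro t ht
          have : t ≠ c + r := fun he => hns (he ▸ ht)
          rw [Bool.eq_iff_iff, inIv_true_iff, inIv_true_iff]; omega
        rw [hstep, if_congr hg rfl rfl]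
        exact ihk (r + 1) (by omega) (by omega) reachable queue hM' hQ'
      · -- standable square
        have hmem : c + r ∈ sqOf N A := by
          rw [mem_sqOf]
          by_cases hle : c + r ≤ N
          · refine Or.inr (Or.inl ⟨by omega, hle, fun hv => hdang ⟨hle, hv⟩⟩)
          · exact Or.inr (Or.inr (by omega))
        have hmarked : PySem.List.pyGetD reachable (c + r) false = true ↔ c + r ≤ b := by
          rw [hM.2 (c + r) (by omega) (by omega)]
          constructor
          · rintro ⟨-, hb⟩; omega
          · intro hb; exact ⟨hmem, by omega⟩
        by_cases hold : c + r ≤ b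
        · -- already marked: skipped
          have hcond : ¬ (c + r ≤ N + 1 ∧ ¬ (PySem.List.pyGetD reachable (c + r) false = true)) := by
            rintro ⟨-, hn⟩; exact hn (hmarked.2 hold)
          have hstep : pvRollsA N A (N + 1) c (r :: PySem.List.pyRange (r + 1) (d + 1) 1) reachable queue
              = pvRollsA N A (N + 1) c (PySem.List.pyRange (r + 1) (d + 1) 1) reachable queue := by
            simp only [pvRollsA]
            rw [if_neg hbig, if_neg hdang, if_neg hcond]
          have hM' : MarkedInv N A reachable (max b (c + (r + 1) - 1)) := by
            refine MarkedInv_mono N A reachable _ _ hM (fun p hp => ?_)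
            rw [harith]; omega
          have hQ' : queue = q0 ++ (sqOf N A).filter (inIv b (c + (r + 1) - 1)) := by
            rw [hQ, harith]
            congr 1
            apply List.filter_congr
            intro t ht
            rw [Bool.eq_iff_iff, inIv_true_iff, inIv_true_iff]; omega
          rw [hstep, if_congr hg rfl rfl]
          exact ihk (r + 1) (by omega) (by omega) reachable queue hM' hQ'
        · -- new square: marked and enqueued
          have hcond : c + r ≤ N + 1 ∧ ¬ (PySem.List.pyGetD reachable (c + r) false = true) := by
            exact ⟨by omega, fun hmk => hold (hmarked.1 hmk)⟩
          have hstep : pvRollsA N A (N + 1) c (r :: PySem.List.pyRange (r + 1) (d + 1) 1) reachable queue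
              = pvRollsA N A (N + 1) c (PySem.List.pyRange (r + 1) (d + 1) 1)
                  (PySem.List.pySetD reachable (c + r) true) (queue ++ [c + r]) := by
            simp only [pvRollsA]
            rw [if_neg hbig, if_neg hdang, if_pos hcond]
          have hM' : MarkedInv N A (PySem.List.pySetD reachable (c + r) true) (max b (c + (r + 1) - 1)) := by
            refine MarkedInv_set N A reachable _ hM (c + r) (by omega) (by omega) hmem _ (by rw [harith]; omega)
              (fun p hp hne => by rw [harith]; omega)
          have hQ' : queue ++ [c + r] = q0 ++ (sqOf N A).filter (inIv b (c + (r + 1) - 1)) := by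
            have hsnoc : (sqOf N A).filter (inIv b (c + r)) =
                (sqOf N A).filter (inIv b (c + r - 1)) ++ [c + r] :=
              filter_btw_snoc (sqOf N A) (sqOf_sorted N A hN) b (c + r) hmem (by omega)
            rw [hQ, harith, hsnoc, List.append_assoc]
          rw [hstep, if_congr hg rfl rfl]
          exact ihk (r + 1) (by omega) (by omega) _ _ hM' hQ'

-- ---- the while loop ----
theorem pvWhileA_true (N : Int) (A : List Int) (hN : 0 ≤ N) (d : Int) (hd : 1 ≤ d)
    (hgap : ∀ l1 u v l2, sqOf N A = l1 ++ u :: v :: l2 → v - u ≤ d) :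
    ∀ fuel : Nat, ∀ a b : Int, ∀ reachable queue,
      MarkedInv N A reachable b →
      queue = (sqOf N A).filter (inIv a b) →
      queue ≠ [] →
      ((sqOf N A).filter (fun t => decide (a < t))).length ≤ fuel →
      pvWhileA N A (N + 1) d fuel reachable queue = true := by
  have hsort := sqOf_sorted N A hN
  intro fuel
  induction fuel with
  | zero =>
    intro a b reachable queue hM hQ hne hfuel
    exfalso
    have h1 : (sqOf N A).filter (inIv a b) =
        ((sqOf N A).filter (fun t => decide (a < t))).filter (fun t => decide (t ≤ b)) := by
      rw [List.filter_filter]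
      exact List.filter_congr (fun t _ => (Bool.and_comm _ _).symm)
    have h2 := List.length_filter_le (fun t => decide (t ≤ b))
      ((sqOf N A).filter (fun t => decide (a < t)))
    rw [← h1] at h2
    have h3 : queue.length = 0 := by rw [hQ]; omega
    exact hne (List.eq_nil_of_length_eq_zero h3)
  | succ fuel ih =>
    intro a b reachable queue hM hQ hne hfuel
    rcases hql : queue with - | ⟨c, rest⟩
    · exact absurd hql hne
    · subst hql
      have hcm : c ∈ (sqOf N A).filter (inIv a b) := by rw [← hQ]; exact List.mem_cons_self ..
      have hcsq : c ∈ sqOf N A := (List.mem_filter.1 hcm).1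
      have hcab : a < c ∧ c ≤ b := (inIv_true_iff _ _ _).1 (List.mem_filter.1 hcm).2
      have hc0 : 0 ≤ c := (sqOf_bounds N A hN c hcsq).1
      have hrest : rest = (sqOf N A).filter (inIv c b) := by
        rw [filter_sorted_cons (sqOf N A) hsort (inIv a b) c rest hQ.symm]
        apply List.filter_congr
        intro t ht
        rw [Bool.eq_iff_iff]
        simp only [Bool.and_eq_true, inIv_true_iff, decide_eq_true_eq]
        omega
      have hM0 : MarkedInv N A reachable (max b (c + 1 - 1)) := by
        refine MarkedInv_mono N A reachable _ _ hM (fun p hp => ?_)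
        have hmx : max b (c + 1 - 1) = b := max_eq_left (by omega)
        omega
      have hQ0 : rest = rest ++ (sqOf N A).filter (inIv b (c + 1 - 1)) := by
        have : (sqOf N A).filter (inIv b (c + 1 - 1)) = [] :=
          List.filter_eq_nil_iff.2 (fun t _ => by rw [inIv_true_iff]; omega)
        rw [this, List.append_nil]
      have hroll := pvRollsA_spec N A hN d c b hd hcsq hc0 rest d.toNat 1 (by omega) (by omega)
        reachable rest hM0 hQ0
      by_cases hbig : N + 1 < c + d
      · rw [if_pos ⟨hd, hbig⟩] at hroll
        simp only [pvWhileA]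
        rw [hroll]
      · rw [if_neg (by omega)] at hroll
        obtain ⟨R, Q, heq, hMR, hQR⟩ := hroll
        have hQR' : Q = (sqOf N A).filter (inIv c (max b (c + d))) := by
          rw [hQR, hrest]
          have h1 : (sqOf N A).filter (inIv b (c + d)) =
              (sqOf N A).filter (inIv b (max b (c + d))) := by
            apply List.filter_congr
            intro t ht
            rw [Bool.eq_iff_iff, inIv_true_iff, inIv_true_iff]; omega
          rw [h1]
          exact filter_btw_merge (sqOf N A) hsort c b (max b (c + d)) (by omega) (le_max_left _ _)
        obtain ⟨l1, rest2, hspl⟩ := List.append_of_mem hcsq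
        have hsort2 := hsort
        rw [hspl] at hsort2
        rcases hr2 : rest2 with - | ⟨w, l2⟩
        · exfalso
          have hgm := goal_mem_sqOf N A
          rw [hspl, hr2] at hgm
          rcases List.mem_append.1 hgm with h | h
          · have hlt1 := (List.pairwise_append.1 hsort2).2.2 _ h c (List.mem_cons_self ..)
            omega
          · simp only [List.mem_singleton] at h
            omega
        · subst hr2
          have hp2 := (List.pairwise_append.1 hsort2).2.1
          have hcw : c < w := (List.pairwise_cons.1 hp2).1 w (List.mem_cons_self ..)
          have hwgap : w - c ≤ d := hgap l1 c w l2 hspl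
          have hw_mem : w ∈ sqOf N A := by rw [hspl]; simp
          have hwQ : w ∈ Q := by
            rw [hQR']
            exact List.mem_filter.2 ⟨hw_mem, (inIv_true_iff _ _ _).2 ⟨hcw, le_trans (by omega) (le_max_right b (c + d))⟩⟩
          have hQne : Q ≠ [] := List.ne_nil_of_mem hwQ
          have hlt : ((sqOf N A).filter (fun t => decide (c < t))).length <
              ((sqOf N A).filter (fun t => decide (a < t))).length := by
            rw [filter_gt_split (sqOf N A) hsort a c (by omega), List.length_append]
            have hcmem : c ∈ (sqOf N A).filter (inIv a c) :=
              List.mem_filter.2 ⟨hcsq, (inIv_true_iff _ _ _).2 ⟨by omega, le_refl c⟩⟩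
            have := List.length_pos_of_mem hcmem
            omega
          simp only [pvWhileA]
          rw [heq]
          exact ih c (max b (c + d)) R Q hMR hQR' hQne (by omega)

theorem pvWhileA_false (N : Int) (A : List Int) (hN : 0 ≤ N) (d : Int) (hd : 1 ≤ d)
    (l1 : List Int) (u v : Int) (l2 : List Int)
    (hsplit : sqOf N A = l1 ++ u :: v :: l2) (hgt : d < v - u) :
    ∀ fuel : Nat, ∀ a b : Int, ∀ reachable queue,
      MarkedInv N A reachable b →
      queue = (sqOf N A).filter (inIv a b) →
      b < v →
      pvWhileA N A (N + 1) d fuel reachable queue = false := by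
  have hsort := sqOf_sorted N A hN
  intro fuel
  induction fuel with
  | zero => intro a b reachable queue hM hQ hbv; rfl
  | succ fuel ih =>
    intro a b reachable queue hM hQ hbv
    rcases hql : queue with - | ⟨c, rest⟩
    · subst hql; rfl
    · subst hql
      have hcm : c ∈ (sqOf N A).filter (inIv a b) := by rw [← hQ]; exact List.mem_cons_self ..
      have hcsq : c ∈ sqOf N A := (List.mem_filter.1 hcm).1
      have hcab : a < c ∧ c ≤ b := (inIv_true_iff _ _ _).1 (List.mem_filter.1 hcm).2
      have hc0 : 0 ≤ c := (sqOf_bounds N A hN c hcsq).1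
      have hrest : rest = (sqOf N A).filter (inIv c b) := by
        rw [filter_sorted_cons (sqOf N A) hsort (inIv a b) c rest hQ.symm]
        apply List.filter_congr
        intro t ht
        rw [Bool.eq_iff_iff]
        simp only [Bool.and_eq_true, inIv_true_iff, decide_eq_true_eq]
        omega
      have hM0 : MarkedInv N A reachable (max b (c + 1 - 1)) := by
        refine MarkedInv_mono N A reachable _ _ hM (fun p hp => ?_)
        have hmx : max b (c + 1 - 1) = b := max_eq_left (by omega)
        omega
      have hQ0 : rest = rest ++ (sqOf N A).filter (inIv b (c + 1 - 1)) := by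
        have : (sqOf N A).filter (inIv b (c + 1 - 1)) = [] :=
          List.filter_eq_nil_iff.2 (fun t _ => by rw [inIv_true_iff]; omega)
        rw [this, List.append_nil]
      have hsort2 := hsort
      rw [hsplit] at hsort2
      have hcu : c ≤ u := by
        have hcv : c < v := by omega
        have hcm2 := hcsq
        rw [hsplit] at hcm2
        rcases List.mem_append.1 hcm2 with h | h
        · have := (List.pairwise_append.1 hsort2).2.2 _ h u (List.mem_cons_self ..)
          omega
        · rcases List.mem_cons.1 h with rfl | h2
          · exact le_refl c
          · rcases List.mem_cons.1 h2 with rfl | h3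
            · omega
            · have hp := (List.pairwise_append.1 hsort2).2.1
              have := (List.pairwise_cons.1 (List.pairwise_cons.1 hp).2).1 c h3
              omega
      have hvN : v ≤ N + 1 := (sqOf_bounds N A hN v (by rw [hsplit]; simp)).2
      have hroll := pvRollsA_spec N A hN d c b hd hcsq hc0 rest d.toNat 1 (by omega) (by omega)
        reachable rest hM0 hQ0
      rw [if_neg (by omega)] at hroll
      obtain ⟨R, Q, heq, hMR, hQR⟩ := hroll
      have hQR' : Q = (sqOf N A).filter (inIv c (max b (c + d))) := by
        rw [hQR, hrest]
        have h1 : (sqOf N A).filter (inIv b (c + d)) =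
            (sqOf N A).filter (inIv b (max b (c + d))) := by
          apply List.filter_congr
          intro t ht
          rw [Bool.eq_iff_iff, inIv_true_iff, inIv_true_iff]; omega
        rw [h1]
        exact filter_btw_merge (sqOf N A) hsort c b (max b (c + d)) (by omega) (le_max_left _ _)
      simp only [pvWhileA]
      rw [heq]
      exact ih c (max b (c + d)) R Q hMR hQR' (max_lt hbv (by omega))

-- ---- the initial BFS state ----
theorem init_marked (N : Int) (A : List Int) (hN : 0 ≤ N) :
    MarkedInv N A (PySem.List.pySetD (List.replicate (N + 2).toNat false) 0 true) 0 := by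
  constructor
  · rw [PySem.List.length_pySetD, List.length_replicate]
  · intro p hp0 hpN
    have hplt : p.toNat < (List.replicate (N + 2).toNat (false : Bool)).length := by
      rw [List.length_replicate]; omega
    have e : PySem.List.pySetD (List.replicate (N + 2).toNat (false : Bool)) (0 : Int) true
        = (List.replicate (N + 2).toNat (false : Bool)).set (0 : Int).toNat true :=
      PySem.List.pySetD_of_nonneg _ true (by norm_num)
    rw [e, PySem.List.pyGetD_eq_getElem _ false hp0 (by simp; omega)]
    rw [List.getElem_set (by simp; omega)]
    by_cases hp : p = 0
    · subst hp
      simp [zero_mem_sqOf]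
    · have : ¬ ((0:Int).toNat = p.toNat) := by omega
      rw [if_neg this, List.getElem_replicate]
      simp only [Bool.false_eq_true, false_iff]
      rintro ⟨-, hle⟩
      omega

theorem init_queue (N : Int) (A : List Int) (hN : 0 ≤ N) :
    [(0 : Int)] = (sqOf N A).filter (inIv (-1) 0) := by
  rw [sqOf, List.filter_cons_of_pos (by rw [inIv_true_iff]; omega)]
  have hnil : ((PySem.List.pyRange 1 (N + 1) 1).filter
      (fun p => decide (¬ PySem.List.pyGetD A (p - 1) 0 = 1)) ++ [N + 1]).filter (inIv (-1) 0) = [] := by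
    apply List.filter_eq_nil_iff.2
    intro y hy
    have h1 : 1 ≤ y := by
      rcases List.mem_append.1 hy with h | h
      · exact (PySem.List.mem_pyRange_one.1 (List.mem_filter.1 h).1).1
      · simp only [List.mem_singleton] at h; omega
    rw [inIv_true_iff]; omega
  rw [hnil]

-- ---- the dice loop ----
theorem pvDiceA_spec (N : Int) (A : List Int) (M : Int) (hM1 : 1 ≤ M) (hM2 : M ≤ N + 1)
    (hsucc : ∀ d : Int, 1 ≤ d →
      (pvWhileA N A (N + 1) d ((N + 2).toNat + 1)
          (PySem.List.pySetD (List.replicate (N + 2).toNat false) 0 true) [0] = true ↔ M ≤ d)) :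
    ∀ k : Nat, ∀ lo : Int, lo + k = N + 2 → 1 ≤ lo → lo ≤ M →
      pvDiceA N A (N + 1) (PySem.List.pyRange lo (N + 2) 1) = M := by
  intro k
  induction k with
  | zero => intro lo h0 h1 h2; exfalso; omega
  | succ k ih =>
    intro lo h0 h1 h2
    rw [PySem.List.pyRange_one_cons (by omega : lo < N + 2)]
    simp only [pvDiceA]
    by_cases hM : M ≤ lo
    · rw [if_pos ((hsucc lo h1).2 hM)]
      omega
    · have hfalse : pvWhileA N A (N + 1) lo ((N + 2).toNat + 1)
          (PySem.List.pySetD (List.replicate (N + 2).toNat false) 0 true) [0] = false := by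
        cases hb : pvWhileA N A (N + 1) lo ((N + 2).toNat + 1)
            (PySem.List.pySetD (List.replicate (N + 2).toNat false) 0 true) [0]
        · rfl
        · exact absurd ((hsucc lo h1).1 hb) hM
      rw [if_neg (by rw [hfalse]; simp)]
      exact ih (lo + 1) (by omega) (by omega) (by omega)

-- ===== VERDICT (by name: the statement is the Claim_ definition above) =====
theorem find_min_dice_spec : Claim_equal_find_min_dice := by
  intro N A hdom hpre
  unfold Spec_find_min_dice
  by_cases hN : 0 ≤ N
  · -- gaps list is nonempty
    obtain ⟨g0, gs, hg⟩ : ∃ g0 gs, gapsOf (sqOf N A) = g0 :: gs := by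
      rcases hf : (PySem.List.pyRange 1 (N + 1) 1).filter
          (fun p => decide (¬ PySem.List.pyGetD A (p - 1) 0 = 1)) with - | ⟨w, ws⟩
      · exact ⟨N + 1 - 0, _, by rw [sqOf, hf]; rfl⟩
      · exact ⟨w - 0, _, by rw [sqOf, hf]; rfl⟩
    have halt : find_min_dice_alt N A = gs.foldl max g0 := by rw [alt_eq, hg]
    have hmax1 : ∀ g ∈ gapsOf (sqOf N A), g ≤ gs.foldl max g0 := by
      rw [hg]
      intro g hgm
      rcases List.mem_cons.1 hgm with rfl | h
      · exact (PySem.List.le_foldl_max gs g).1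
      · exact (PySem.List.le_foldl_max gs g0).2 g h
    have hmem : gs.foldl max g0 ∈ gapsOf (sqOf N A) := by
      rw [hg]
      rcases PySem.List.foldl_max_mem gs g0 with h | h
      · rw [h]; exact List.mem_cons_self ..
      · exact List.mem_cons_of_mem _ h
    obtain ⟨l1, u, v, l2, hspl, hMv⟩ := gapsOf_mem_split _ _ hmem
    have hsort := sqOf_sorted N A hN
    have hsort2 := hsort
    rw [hspl] at hsort2
    have huv : u < v :=
      (List.pairwise_cons.1 (List.pairwise_append.1 hsort2).2.1).1 v (List.mem_cons_self ..)
    have hub := sqOf_bounds N A hN u (by rw [hspl]; simp)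
    have hvb := sqOf_bounds N A hN v (by rw [hspl]; simp)
    have hM1 : 1 ≤ gs.foldl max g0 := by omega
    have hM2 : gs.foldl max g0 ≤ N + 1 := by omega
    have hsucc : ∀ d : Int, 1 ≤ d →
        (pvWhileA N A (N + 1) d ((N + 2).toNat + 1)
            (PySem.List.pySetD (List.replicate (N + 2).toNat false) 0 true) [0] = true ↔
          gs.foldl max g0 ≤ d) := by
      intro d hd
      constructor
      · intro htrue
        by_contra hnot
        have hfalse := pvWhileA_false N A hN d hd l1 u v l2 hspl (by omega)
          ((N + 2).toNat + 1) (-1) 0 _ [0] (init_marked N A hN) (init_queue N A hN) (by omega)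
        rw [htrue] at hfalse
        simp at hfalse
      · intro hMd
        have hgap : ∀ l1' u' v' l2', sqOf N A = l1' ++ u' :: v' :: l2' → v' - u' ≤ d := by
          intro l1' u' v' l2' hsp
          have := hmax1 (v' - u') (by rw [hsp]; exact sub_mem_gapsOf l1' u' v' l2')
          omega
        have hlen1 := List.length_filter_le (fun t => decide (-1 < t)) (sqOf N A)
        have hlen2 := List.length_filter_le
          (fun p => decide (¬ PySem.List.pyGetD A (p - 1) 0 = 1)) (PySem.List.pyRange 1 (N + 1) 1)
        rw [PySem.List.length_pyRange_one] at hlen2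
        have hlsq : (sqOf N A).length = ((PySem.List.pyRange 1 (N + 1) 1).filter
            (fun p => decide (¬ PySem.List.pyGetD A (p - 1) 0 = 1))).length + 2 := by
          simp [sqOf]
        exact pvWhileA_true N A hN d hd hgap ((N + 2).toNat + 1) (-1) 0 _ [0]
          (init_marked N A hN) (init_queue N A hN) (by simp) (by omega)
    have hdice := pvDiceA_spec N A (gs.foldl max g0) hM1 hM2 hsucc (N + 1).toNat 1
      (by omega) (by omega) hM1
    rw [halt]
    exact hdice
  · -- N < 0: the dice loop is empty and B's squares are [0, N+1]
    have h1 : PySem.List.pyRange 1 (N + 2) 1 = [] := PySem.List.pyRange_one_eq_nil (by omega)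
    have h2 : PySem.List.pyRange 1 (N + 1) 1 = [] := PySem.List.pyRange_one_eq_nil (by omega)
    show find_min_dice N A = find_min_dice_alt N A
    rw [show find_min_dice N A = pvDiceA N A (N + 1) (PySem.List.pyRange 1 (N + 2) 1) from rfl, h1]
    simp only [find_min_dice_alt, h2]
    simp [pvDiceA]
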